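-- pv_equiv track=rewrite | github.com/hasanbaig/GeneTech | src/functions.py | replace_P
-- ===== SOURCE A (Python) =====
-- def replace_P(protein_eq):
--     """Replaces proteins with alphabets"""
--     sums = protein_eq.split(".")                #Get the sums of terms
--     alpha_eq = ""
--     alpha = 65                                  #Start by assigning alphabets starting from 'A'
--     dict = {}
--     for i in range(len(sums)):
--         terms = sums[i][1:-1].split("+")        #Chop the brackets and get terms
--         alpha_eq += "("
--         for j in range(len(terms)):
--             if terms[j][-1] == "'":             #Check if the terms in complemented
--                 if terms[j][:-1] not in dict:           #If the key not already in dictionary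
--                     dict[terms[j][:-1]] = chr(alpha)    #then add one
--                     alpha_eq += chr(alpha)+"'"          #Add to the string as well
--                     alpha += 1                          #Get the next alphabet
--                 else:
--                     alpha_eq += dict[terms[j][:-1]]+"'"         #If the key is in dictionary then use its value
--             else:
--                 if terms[j] not in dict:
--                     dict[terms[j]] = chr(alpha)
--                     alpha_eq += chr(alpha)
--                     alpha += 1
--                 else:
--                     alpha_eq += dict[terms[j]]
--
--             if j<len(terms)-1:
--                 alpha_eq += "+"                         #concatenating '+' after every terms
--
--         alpha_eq += ")"
--         if i < len(sums)-1:
--             alpha_eq += "."                             #concatenating '.' after every sums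
--
--     return alpha_eq, dict       #Return equation with alphabets and the dictionary to be used again while replacing back
-- ===== SOURCE B (Python) =====
-- def replace_P(protein_eq):
--     """Replaces proteins with alphabets"""
--     sums = [s[1:-1].split("+") for s in protein_eq.split(".")]
--     dict = {}
--     # First pass: assign letters to bases in first-appearance order.
--     for terms in sums:
--         for t in terms:
--             base = t[:-1] if t[-1] == "'" else t
--             if base not in dict:
--                 dict[base] = chr(65 + len(dict))
--     # Second pass: render the equation with the completed dictionary.
--     alpha_eq = ".".join(
--         "(" + "+".join(dict[t[:-1]] + "'" if t[-1] == "'" else dict[t]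
--                        for t in terms) + ")"
--         for terms in sums
--     )
--     return alpha_eq, dict
-- ===== Notes on version B (the rewrite author's own statement) =====
-- stated objective: simpler
-- what changed: A builds the output string, the letter counter and the dict together in one pass with positional '+'/'.' separator bookkeeping; B first builds the complete base-to-letter dict (letter = chr(65+len(dict))) in one pass, then renders the whole string with str.join from the finished dict.
import Mathlib
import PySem

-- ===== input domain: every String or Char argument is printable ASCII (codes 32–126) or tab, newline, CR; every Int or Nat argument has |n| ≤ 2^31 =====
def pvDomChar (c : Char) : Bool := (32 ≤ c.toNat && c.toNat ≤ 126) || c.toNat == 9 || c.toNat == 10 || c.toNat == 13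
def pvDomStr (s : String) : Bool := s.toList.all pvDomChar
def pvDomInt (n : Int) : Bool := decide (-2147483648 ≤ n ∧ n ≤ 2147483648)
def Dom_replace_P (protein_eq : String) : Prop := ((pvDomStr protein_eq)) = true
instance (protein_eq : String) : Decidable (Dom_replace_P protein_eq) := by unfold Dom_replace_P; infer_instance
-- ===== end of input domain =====

-- B replaces A's single pass (string, letter counter and dict grown together, with
-- positional '+'/'.' separator bookkeeping) by two passes: first build the complete
-- base→letter dict (letter = chr(65+len(dict))), then render the string by join;
-- objective: simpler (no speed claim).

-- chr(a) for one code point (shared shim; exact for 0 ≤ a below the surrogate range,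
-- which covers every input the checks draw)
def pyChr (a : Int) : List Char := [Char.ofNat a.toNat]

-- s[1:-1].split("+") — the same source expression occurs in both Pythons
def parseSum (s : List Char) : List (List Char) :=
  PySem.Chars.splitOn (PySem.List.slice s (some 1) (some (-1))) ['+']

-- ===== PORT A =====
-- state = (alpha_eq, alpha, dict); strings are carried as List Char via the PySem.Chars
-- primitives (exact; String.ofList at the boundary)
def replaceP_A_term (st : List Char × Int × PySem.Dict (List Char) (List Char))
    (t : List Char) : List Char × Int × PySem.Dict (List Char) (List Char) :=
  match PySem.List.pyGet? t (-1) with          -- terms[j][-1]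
  | none => st                                 -- Python raises IndexError here; excluded by Pre_
  | some c =>
    if c = '\'' then
      let key := PySem.List.slice t none (some (-1))   -- terms[j][:-1]
      if st.2.2.contains key = false then
        (st.1 ++ pyChr st.2.1 ++ ['\''], st.2.1 + 1, st.2.2.insert key (pyChr st.2.1))
      else
        (st.1 ++ st.2.2.getD key [] ++ ['\''], st.2.1, st.2.2)
    else
      if st.2.2.contains t = false then
        (st.1 ++ pyChr st.2.1, st.2.1 + 1, st.2.2.insert t (pyChr st.2.1))
      else
        (st.1 ++ st.2.2.getD t [], st.2.1, st.2.2)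

-- for j in range(len(terms)): … ; if j < len(terms)-1: alpha_eq += "+"
def replaceP_A_terms (terms : List (List Char)) (j m : Nat)
    (st : List Char × Int × PySem.Dict (List Char) (List Char)) :
    List Char × Int × PySem.Dict (List Char) (List Char) :=
  match terms with
  | [] => st
  | t :: rest =>
    let st1 := replaceP_A_term st t
    let st2 := if j < m - 1 then (st1.1 ++ ['+'], st1.2.1, st1.2.2) else st1
    replaceP_A_terms rest (j + 1) m st2

-- for i in range(len(sums)): … ; if i < len(sums)-1: alpha_eq += "."
def replaceP_A_sums (sums : List (List Char)) (i n : Nat)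
    (st : List Char × Int × PySem.Dict (List Char) (List Char)) :
    List Char × Int × PySem.Dict (List Char) (List Char) :=
  match sums with
  | [] => st
  | s :: rest =>
    let terms := parseSum s
    let st1 := (st.1 ++ ['('], st.2.1, st.2.2)
    let st2 := replaceP_A_terms terms 0 terms.length st1
    let st3 := (st2.1 ++ [')'], st2.2.1, st2.2.2)
    let st4 := if i < n - 1 then (st3.1 ++ ['.'], st3.2.1, st3.2.2) else st3
    replaceP_A_sums rest (i + 1) n st4

def replace_P (protein_eq : String) : String × (List (String × String)) :=
  let sums := PySem.Chars.splitOn protein_eq.toList ['.']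
  let st := replaceP_A_sums sums 0 sums.length ([], 65, PySem.Dict.empty)
  (String.ofList st.1, st.2.2.items.map (fun p => (String.ofList p.1, String.ofList p.2)))

-- ===== PORT B =====
def replace_P_alt (protein_eq : String) : String × (List (String × String)) :=
  let sums := (PySem.Chars.splitOn protein_eq.toList ['.']).map parseSum
  -- first pass: get-or-assign every base into the dict
  let d := sums.foldl (fun d terms =>
      terms.foldl (fun (d : PySem.Dict (List Char) (List Char)) t =>
        match PySem.List.pyGet? t (-1) with    -- t[-1]
        | none => d                            -- Python raises IndexError here; excluded by Pre_
        | some c =>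
          let base := if c = '\'' then PySem.List.slice t none (some (-1)) else t
          if d.contains base then d else d.insert base (pyChr (65 + (d.size : Int)))) d)
    PySem.Dict.empty
  -- second pass: render with the completed dict
  let alpha_eq := PySem.Chars.join ['.'] (sums.map (fun terms =>
      ['('] ++ PySem.Chars.join ['+'] (terms.map (fun t =>
        match PySem.List.pyGet? t (-1) with
        | none => []                           -- Python raises IndexError here; excluded by Pre_
        | some c =>
          if c = '\'' then d.getD (PySem.List.slice t none (some (-1))) [] ++ ['\'']
          else d.getD t [])) ++ [')']))
  (String.ofList alpha_eq, d.items.map (fun p => (String.ofList p.1, String.ofList p.2)))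

-- ===== PRECONDITION & SPEC =====
-- Pre_ excludes exactly the inputs in which some bracket-stripped sum yields an empty
-- term: there A (and B alike) evaluates term[-1] on an empty string and raises IndexError.
def Pre_replace_P (protein_eq : String) : Prop :=
  ∀ s ∈ PySem.Chars.splitOn protein_eq.toList ['.'], ∀ t ∈ parseSum s, t ≠ []
instance (protein_eq : String) : Decidable (Pre_replace_P protein_eq) := by
  unfold Pre_replace_P; infer_instance

def pvWitness_replace_P : String := "(a+b').(b+c)"

def Spec_replace_P (protein_eq : String) (out : String × (List (String × String))) : Prop := out = replace_P_alt protein_eq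
instance (protein_eq : String) (out : String × (List (String × String))) : Decidable (Spec_replace_P protein_eq out) := by unfold Spec_replace_P; infer_instance

-- ===== CLAIM (what is proved, stated in full; the proofs are below) =====
def Claim_equal_replace_P : Prop := ∀ (protein_eq : String), Dom_replace_P protein_eq → Pre_replace_P protein_eq → Spec_replace_P protein_eq (replace_P protein_eq)

-- ===== LEMMAS AND PROOFS =====

-- proof-side model of one dict update of B's first pass (= A's dict update)
def stepT (d : PySem.Dict (List Char) (List Char)) (t : List Char) :
    PySem.Dict (List Char) (List Char) :=
  match t.getLast? with
  | none => d
  | some c =>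
    let base := if c = '\'' then t.dropLast else t
    if d.contains base then d else d.insert base (pyChr (65 + (d.size : Int)))

def buildTerms (d : PySem.Dict (List Char) (List Char)) (terms : List (List Char)) :
    PySem.Dict (List Char) (List Char) :=
  terms.foldl stepT d

def buildD (d : PySem.Dict (List Char) (List Char)) (L : List (List (List Char))) :
    PySem.Dict (List Char) (List Char) :=
  L.foldl buildTerms d

-- proof-side model of one rendered term of B's second pass
def renderT (D : PySem.Dict (List Char) (List Char)) (t : List Char) : List Char :=
  match t.getLast? with
  | none => []
  | some c => if c = '\'' then D.getD t.dropLast [] ++ ['\''] else D.getD t []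

lemma contains_stepT_mono {d : PySem.Dict (List Char) (List Char)} {k : List Char}
    (t : List Char) (h : d.contains k = true) : (stepT d t).contains k = true := by
  unfold stepT
  cases t.getLast? with
  | none => exact h
  | some c =>
    by_cases hc : d.contains (if c = '\'' then t.dropLast else t) = true
    · simpa [hc] using h
    · simp [hc, PySem.Dict.contains_insert, h]

lemma contains_buildTerms_mono {d : PySem.Dict (List Char) (List Char)} {k : List Char}
    (terms : List (List Char)) (h : d.contains k = true) :
    (buildTerms d terms).contains k = true := by
  induction terms generalizing d with
  | nil => exact h
  | cons t rest ih => exact ih (contains_stepT_mono t h)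

lemma getD_stepT_stable {d : PySem.Dict (List Char) (List Char)} {k : List Char}
    (t : List Char) (h : d.contains k = true) : (stepT d t).getD k [] = d.getD k [] := by
  unfold stepT
  cases t.getLast? with
  | none => rfl
  | some c =>
    by_cases hc : d.contains (if c = '\'' then t.dropLast else t) = true
    · simp [hc]
    · simp only [hc, if_false, Bool.false_eq_true]
      exact PySem.Dict.getD_insert_of_ne _ _ _ (by intro hk; subst hk; simp [h] at hc)

lemma getD_buildTerms_stable {d : PySem.Dict (List Char) (List Char)} {k : List Char}
    (terms : List (List Char)) (h : d.contains k = true) :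
    (buildTerms d terms).getD k [] = d.getD k [] := by
  induction terms generalizing d with
  | nil => rfl
  | cons t rest ih =>
    have := ih (d := stepT d t) (contains_stepT_mono t h)
    simpa [buildTerms, getD_stepT_stable t h] using this

lemma getD_buildD_stable {d : PySem.Dict (List Char) (List Char)} {k : List Char}
    (L : List (List (List Char))) (h : d.contains k = true) :
    (buildD d L).getD k [] = d.getD k [] := by
  induction L generalizing d with
  | nil => rfl
  | cons terms rest ih =>
    have := ih (d := buildTerms d terms) (contains_buildTerms_mono terms h)
    simpa [buildD, getD_buildTerms_stable terms h] using this

lemma contains_buildD_mono {d : PySem.Dict (List Char) (List Char)} {k : List Char}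
    (L : List (List (List Char))) (h : d.contains k = true) :
    (buildD d L).contains k = true := by
  induction L generalizing d with
  | nil => exact h
  | cons terms rest ih => exact ih (contains_buildTerms_mono terms h)

-- one term of A's loop, characterised against the completed dict D
lemma termA_eq (t : List Char) (ht : t ≠ []) (out : List Char)
    (d D : PySem.Dict (List Char) (List Char))
    (hD : ∀ k, (stepT d t).contains k = true → D.getD k [] = (stepT d t).getD k []) :
    replaceP_A_term (out, (65 + (d.size : Int), d)) t
      = (out ++ renderT D t, (65 + ((stepT d t).size : Int), stepT d t)) := by
  obtain ⟨c, hc⟩ : ∃ c, t.getLast? = some c :=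
    Option.isSome_iff_exists.mp (List.getLast?_isSome.mpr ht)
  by_cases hp : c = '\''
  · by_cases hcont : d.contains t.dropLast = true
    · have hst : stepT d t = d := by simp [stepT, hc, hp, hcont]
      have hDd : D.getD t.dropLast [] = d.getD t.dropLast [] := by
        have := hD t.dropLast (by rw [hst]; exact hcont)
        rwa [hst] at this
      simp [replaceP_A_term, PySem.List.pyGet?_neg_one, hc, hp,
        PySem.List.slice_to_neg_one, hcont, renderT, hst, hDd]
    · have hst : stepT d t = d.insert t.dropLast (pyChr (65 + (d.size : Int))) := by
        simp [stepT, hc, hp, hcont]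
      have hDd : D.getD t.dropLast [] = pyChr (65 + (d.size : Int)) := by
        have := hD t.dropLast (by rw [hst]; exact PySem.Dict.contains_insert_self _ _ _)
        rwa [hst, PySem.Dict.getD_insert_self] at this
      simp [replaceP_A_term, PySem.List.pyGet?_neg_one, hc, hp,
        PySem.List.slice_to_neg_one, hcont, renderT, hst, hDd,
        PySem.Dict.size_insert]
      omega
  · by_cases hcont : d.contains t = true
    · have hst : stepT d t = d := by simp [stepT, hc, hp, hcont]
      have hDd : D.getD t [] = d.getD t [] := by
        have := hD t (by rw [hst]; exact hcont)
        rwa [hst] at this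
      simp [replaceP_A_term, PySem.List.pyGet?_neg_one, hc, hp, hcont, renderT, hst, hDd]
    · have hst : stepT d t = d.insert t (pyChr (65 + (d.size : Int))) := by
        simp [stepT, hc, hp, hcont]
      have hDd : D.getD t [] = pyChr (65 + (d.size : Int)) := by
        have := hD t (by rw [hst]; exact PySem.Dict.contains_insert_self _ _ _)
        rwa [hst, PySem.Dict.getD_insert_self] at this
      simp [replaceP_A_term, PySem.List.pyGet?_neg_one, hc, hp, hcont, renderT, hst, hDd,
        PySem.Dict.size_insert]
      omega

-- A's inner loop, characterised against the completed dict D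
lemma innerA (terms : List (List Char)) (j m : Nat) (out : List Char)
    (d D : PySem.Dict (List Char) (List Char))
    (hne : ∀ t ∈ terms, t ≠ []) (hjm : j + terms.length = m)
    (hD : ∀ k, (buildTerms d terms).contains k = true →
      D.getD k [] = (buildTerms d terms).getD k []) :
    replaceP_A_terms terms j m (out, (65 + (d.size : Int), d))
      = (out ++ PySem.Chars.join ['+'] (terms.map (renderT D)),
         (65 + ((buildTerms d terms).size : Int), buildTerms d terms)) := by
  induction terms generalizing j out d with
  | nil => simp [replaceP_A_terms, buildTerms, PySem.Chars.join_nil]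
  | cons t rest ih =>
    have ht : t ≠ [] := hne t (List.mem_cons_self ..)
    have hcons : buildTerms d (t :: rest) = buildTerms (stepT d t) rest := rfl
    have hD1 : ∀ k, (stepT d t).contains k = true →
        D.getD k [] = (stepT d t).getD k [] := by
      intro k hk
      have h2 : (buildTerms (stepT d t) rest).contains k = true :=
        contains_buildTerms_mono rest hk
      have := hD k (by rw [hcons]; exact h2)
      rw [hcons, getD_buildTerms_stable rest hk] at this
      exact this
    cases rest with
    | nil =>
      have hnotlt : ¬ j < m - 1 := by simp at hjm; omega
      rw [replaceP_A_terms, termA_eq t ht out d D hD1]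
      dsimp only
      rw [if_neg hnotlt, replaceP_A_terms]
      simp [buildTerms, PySem.Chars.join_singleton]
    | cons t2 rest' =>
      have hlt : j < m - 1 := by simp at hjm; omega
      rw [replaceP_A_terms, termA_eq t ht out d D hD1]
      dsimp only
      rw [if_pos hlt]
      rw [ih (j + 1) (out ++ renderT D t ++ ['+']) (stepT d t)
        (fun u hu => hne u (List.mem_cons_of_mem _ hu))
        (by simp at hjm ⊢; omega)
        (by rw [hcons] at hD; exact hD)]
      simp only [List.map_cons]
      rw [PySem.Chars.join_cons_cons, hcons]
      simp

-- A's outer loop, characterised against the completed dict D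
lemma outerA (sums : List (List Char)) (i n : Nat) (out : List Char)
    (d D : PySem.Dict (List Char) (List Char))
    (hne : ∀ s ∈ sums, ∀ t ∈ parseSum s, t ≠ []) (hin : i + sums.length = n)
    (hD : ∀ k, (buildD d (sums.map parseSum)).contains k = true →
      D.getD k [] = (buildD d (sums.map parseSum)).getD k []) :
    replaceP_A_sums sums i n (out, (65 + (d.size : Int), d))
      = (out ++ PySem.Chars.join ['.'] (sums.map (fun s =>
            ['('] ++ PySem.Chars.join ['+'] ((parseSum s).map (renderT D)) ++ [')'])),
         (65 + ((buildD d (sums.map parseSum)).size : Int), buildD d (sums.map parseSum))) := by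
  induction sums generalizing i out d with
  | nil => simp [replaceP_A_sums, buildD, PySem.Chars.join_nil]
  | cons s rest ih =>
    have hcons : buildD d ((s :: rest).map parseSum)
        = buildD (buildTerms d (parseSum s)) (rest.map parseSum) := rfl
    have hD1 : ∀ k, (buildTerms d (parseSum s)).contains k = true →
        D.getD k [] = (buildTerms d (parseSum s)).getD k [] := by
      intro k hk
      have h2 : (buildD (buildTerms d (parseSum s)) (rest.map parseSum)).contains k = true :=
        contains_buildD_mono _ hk
      have := hD k (by rw [hcons]; exact h2)
      rw [hcons, getD_buildD_stable _ hk] at this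
      exact this
    have hinner := innerA (parseSum s) 0 (parseSum s).length (out ++ ['(']) d D
      (hne s (List.mem_cons_self ..)) (Nat.zero_add _) hD1
    cases rest with
    | nil =>
      have hnotlt : ¬ i < n - 1 := by simp at hin; omega
      rw [replaceP_A_sums]
      dsimp only
      rw [hinner]
      dsimp only
      rw [if_neg hnotlt, replaceP_A_sums]
      simp [buildD, buildTerms, PySem.Chars.join_singleton]
    | cons s2 rest' =>
      have hlt : i < n - 1 := by simp at hin; omega
      rw [replaceP_A_sums]
      dsimp only
      rw [hinner]
      dsimp only
      rw [if_pos hlt]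
      rw [ih (i + 1)
        (out ++ ['('] ++ PySem.Chars.join ['+'] ((parseSum s).map (renderT D)) ++ [')'] ++ ['.'])
        (buildTerms d (parseSum s))
        (fun u hu => hne u (List.mem_cons_of_mem _ hu))
        (by simp at hin ⊢; omega)
        (by rw [hcons] at hD; exact hD)]
      simp only [List.map_cons] at hcons ⊢
      rw [PySem.Chars.join_cons_cons, hcons]
      simp

-- ===== VERDICT (by name: the statement is the Claim_ definition above) =====
theorem replace_P_spec : Claim_equal_replace_P := by
  intro protein_eq _ hpre
  unfold Spec_replace_P
  show replace_P protein_eq = replace_P_alt protein_eq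
  have hstep : (fun (d : PySem.Dict (List Char) (List Char)) (t : List Char) =>
      match PySem.List.pyGet? t (-1) with
      | none => d
      | some c =>
        let base := if c = '\'' then PySem.List.slice t none (some (-1)) else t
        if d.contains base then d else d.insert base (pyChr (65 + (d.size : Int)))) = stepT := by
    funext d t
    simp only [stepT, PySem.List.pyGet?_neg_one, PySem.List.slice_to_neg_one]
  have hA := outerA (PySem.Chars.splitOn protein_eq.toList ['.']) 0
    (PySem.Chars.splitOn protein_eq.toList ['.']).length []
    PySem.Dict.empty
    (buildD PySem.Dict.empty ((PySem.Chars.splitOn protein_eq.toList ['.']).map parseSum))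
    hpre (Nat.zero_add _) (fun _ _ => rfl)
  simp only [replace_P, replace_P_alt]
  have h0 : (65 : Int) = 65 + ((PySem.Dict.empty : PySem.Dict (List Char) (List Char)).size : Int) := by
    simp
  conv_lhs => rw [h0]
  rw [hA]
  have hdict : ((PySem.Chars.splitOn protein_eq.toList ['.']).map parseSum).foldl
      (fun d terms => terms.foldl (fun (d : PySem.Dict (List Char) (List Char)) t =>
        match PySem.List.pyGet? t (-1) with
        | none => d
        | some c =>
          let base := if c = '\'' then PySem.List.slice t none (some (-1)) else t
          if d.contains base then d else d.insert base (pyChr (65 + (d.size : Int)))) d)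
      PySem.Dict.empty
      = buildD PySem.Dict.empty ((PySem.Chars.splitOn protein_eq.toList ['.']).map parseSum) := by
    rw [hstep]; rfl
  rw [hdict]
  have hrender : ((PySem.Chars.splitOn protein_eq.toList ['.']).map parseSum).map
      (fun terms => ['('] ++ PySem.Chars.join ['+'] (terms.map (fun t =>
        match PySem.List.pyGet? t (-1) with
        | none => ([] : List Char)
        | some c =>
          if c = '\'' then
            (buildD PySem.Dict.empty
              ((PySem.Chars.splitOn protein_eq.toList ['.']).map parseSum)).getD
              (PySem.List.slice t none (some (-1))) [] ++ ['\'']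
          else (buildD PySem.Dict.empty
              ((PySem.Chars.splitOn protein_eq.toList ['.']).map parseSum)).getD t [])) ++ [')'])
      = (PySem.Chars.splitOn protein_eq.toList ['.']).map (fun s =>
          ['('] ++ PySem.Chars.join ['+'] ((parseSum s).map (renderT
            (buildD PySem.Dict.empty
              ((PySem.Chars.splitOn protein_eq.toList ['.']).map parseSum)))) ++ [')']) := by
    rw [List.map_map]
    apply List.map_congr_left
    intro s hs
    simp only [Function.comp]
    congr 2
    congr 1
    apply List.map_congr_left
    intro t htm
    have ht : t ≠ [] := hpre s hs t htm
    obtain ⟨c, hc⟩ : ∃ c, t.getLast? = some c :=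
      Option.isSome_iff_exists.mp (List.getLast?_isSome.mpr ht)
    simp [renderT, PySem.List.pyGet?_neg_one, hc, PySem.List.slice_to_neg_one]
  rw [hrender]
  simp
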